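-- pv_equiv track=rewrite | github.com/weidadezhihui-cell/ecommerce_dashboard | utils.py | _row_has_amazon_header
-- ===== SOURCE A (Python) =====
-- from typing import Tuple, Dict, Optional, List
--
-- _AMAZON_HEADER_REQUIRED = [
--     ['date/time', 'date time'],   # date column: either form
--     ['type'],
--     ['order id', 'order-id'],
--     ['total'],
-- ]
--
-- def _normalize_header_cell(cell: str) -> str:
--     """Lowercase, strip, collapse extra spaces. Used for case-insensitive header matching."""
--     return ' '.join(str(cell).strip().lower().split())
--
-- def _row_has_amazon_header(cells: List[str]) -> bool:
--     """
--     Return True iff this row has at least date/time (or date time), type, order id, total.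
--     Case-insensitive; extra spaces ignored. Each required group must match at least one cell.
--     """
--     norm = [_normalize_header_cell(c) for c in cells]
--     for group in _AMAZON_HEADER_REQUIRED:
--         found = False
--         for n in norm:
--             for g in group:
--                 if g == n or (len(g) > 2 and g in n):
--                     found = True
--                     break
--             if found:
--                 break
--         if not found:
--             return False
--     return True
-- ===== SOURCE B (Python) =====
-- _AMAZON_HEADER_REQUIRED = [
--     ['date/time', 'date time'],
--     ['type'],
--     ['order id', 'order-id'],
--     ['total'],
-- ]
--
-- def _row_has_amazon_header(cells):
--     # Single pass over the cells, keeping the still-unsatisfied required groups.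
--     pending = list(_AMAZON_HEADER_REQUIRED)
--     for cell in cells:
--         n = ' '.join(str(cell).strip().lower().split())
--         pending = [grp for grp in pending
--                    if not any(g == n or (len(g) > 2 and g in n) for g in grp)]
--         if not pending:
--             return True
--     return not pending
-- ===== Notes on version B (the rewrite author's own statement) =====
-- stated objective: alternative
-- what changed: Single pass over the cells maintaining the set of still-unsatisfied required groups (filtered out as they match, early exit when empty), instead of A's outer loop over groups each rescanning all normalized cells.
import Mathlib
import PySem

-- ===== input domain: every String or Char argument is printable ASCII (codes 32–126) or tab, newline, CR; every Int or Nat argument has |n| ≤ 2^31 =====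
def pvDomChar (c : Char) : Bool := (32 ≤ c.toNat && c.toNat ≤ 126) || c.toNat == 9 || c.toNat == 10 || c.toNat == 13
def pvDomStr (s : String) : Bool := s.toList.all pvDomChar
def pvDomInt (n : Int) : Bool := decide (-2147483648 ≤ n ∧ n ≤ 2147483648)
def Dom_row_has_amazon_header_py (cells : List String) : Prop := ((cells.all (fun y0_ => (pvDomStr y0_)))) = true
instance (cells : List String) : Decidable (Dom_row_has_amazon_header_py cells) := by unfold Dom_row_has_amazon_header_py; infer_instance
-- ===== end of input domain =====

-- B: one pass over the cells, filtering a pending list of required groups (early exit when empty),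
-- instead of A's loop over groups each rescanning all normalized cells. Same return value; objective: alternative.

-- ===== PORT A =====
def pvGroups : List (List String) :=
  [["date/time", "date time"], ["type"], ["order id", "order-id"], ["total"]]

-- _normalize_header_cell: ' '.join(cell.strip().lower().split())
def pvNormalize (cell : String) : String :=
  PySem.Str.join " " (PySem.Str.split₀ (PySem.Str.lower (PySem.Str.strip cell)))

-- the match rule: g == n or (len(g) > 2 and g in n)
def pvMatch (g n : String) : Bool :=
  g == n || (decide (2 < PySem.Str.len g) && PySem.Str.isIn g n)

def row_has_amazon_header_py (cells : List String) : Bool :=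
  let norm := cells.map (fun c => pvNormalize c)
  pvGroups.all (fun group => norm.any (fun n => group.any (fun g => pvMatch g n)))

-- ===== PORT B =====
def pvAltLoop (cells : List String) (pending : List (List String)) : Bool :=
  match cells with
  | [] => pending.isEmpty
  | c :: rest =>
    let n := pvNormalize c
    let pending' := pending.filter (fun grp => !grp.any (fun g => pvMatch g n))
    if pending'.isEmpty then true else pvAltLoop rest pending'

def row_has_amazon_header_py_alt (cells : List String) : Bool :=
  pvAltLoop cells pvGroups

-- ===== PRECONDITION & SPEC =====
def Spec_row_has_amazon_header_py (cells : List String) (out : Bool) : Prop := out = row_has_amazon_header_py_alt cells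
instance (cells : List String) (out : Bool) : Decidable (Spec_row_has_amazon_header_py cells out) := by unfold Spec_row_has_amazon_header_py; infer_instance

-- ===== CLAIM (what is proved, stated in full; the proofs are below) =====
def Claim_equal_row_has_amazon_header_py : Prop := ∀ (cells : List String), Dom_row_has_amazon_header_py cells → Spec_row_has_amazon_header_py cells (row_has_amazon_header_py cells)

-- ===== LEMMAS AND PROOFS =====

-- filtering the satisfied groups out commutes with the universal check
lemma pv_all_filter (p q : List String → Bool) (pending : List (List String)) :
    pending.all (fun grp => p grp || q grp)
      = (pending.filter (fun grp => !p grp)).all q := by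
  induction pending with
  | nil => rfl
  | cons grp rest ih =>
    rw [List.all_cons, List.filter_cons, ih]
    cases hp : p grp with
    | true => simp
    | false => simp

lemma pvAltLoop_eq (cells : List String) : ∀ (pending : List (List String)),
    pvAltLoop cells pending
      = pending.all (fun grp => cells.any (fun c => grp.any (fun g => pvMatch g (pvNormalize c)))) := by
  induction cells with
  | nil =>
    intro pending
    cases pending with
    | nil => rfl
    | cons a l =>
      simp only [pvAltLoop, List.any_nil, List.all_cons, List.isEmpty_cons, Bool.false_and]
  | cons c rest ih =>
    intro pending
    have hsplit : pending.all (fun grp => (c :: rest).any (fun cc => grp.any (fun g => pvMatch g (pvNormalize cc))))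
        = (pending.filter (fun grp => !grp.any (fun g => pvMatch g (pvNormalize c)))).all
            (fun grp => rest.any (fun cc => grp.any (fun g => pvMatch g (pvNormalize cc)))) := by
      simp only [List.any_cons]
      exact
        pv_all_filter (fun grp => grp.any (fun g => pvMatch g (pvNormalize c)))
          (fun grp => rest.any (fun cc => grp.any (fun g => pvMatch g (pvNormalize cc)))) pending
    rw [hsplit]
    simp only [pvAltLoop]
    by_cases h : (pending.filter (fun grp => !grp.any (fun g => pvMatch g (pvNormalize c)))).isEmpty
    · rw [if_pos h, List.isEmpty_iff.mp h]
      rfl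
    · rw [if_neg h, ih]

-- ===== VERDICT (by name: the statement is the Claim_ definition above) =====
theorem row_has_amazon_header_py_spec : Claim_equal_row_has_amazon_header_py := by
  intro cells _
  unfold Spec_row_has_amazon_header_py row_has_amazon_header_py row_has_amazon_header_py_alt
  rw [pvAltLoop_eq]
  simp [List.any_map, Function.comp_def]
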